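-- pv_equiv track=rewrite | github.com/breezy89757/pdf-litellm-parser | main.py | batch_ranges
-- ===== SOURCE A (Python) =====
-- from typing import Any, List
--
-- def batch_ranges(total_pages: int, batch_size: int, overlap: int) -> List[tuple[int, int]]:
--     if total_pages <= 0:
--         return []
--
--     batch_size = max(1, batch_size)
--     overlap = max(0, min(overlap, batch_size - 1))
--     step = batch_size - overlap
--
--     ranges: List[tuple[int, int]] = []
--     start = 0
--     while start < total_pages:
--         end = min(start + batch_size, total_pages)
--         ranges.append((start, end))
--         if end >= total_pages:
--             break
--         start += step
--     return ranges
-- ===== SOURCE B (Python) =====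
-- def batch_ranges(total_pages, batch_size, overlap):
--     if total_pages <= 0:
--         return []
--     batch_size = max(1, batch_size)
--     overlap = max(0, min(overlap, batch_size - 1))
--     step = batch_size - overlap
--     if total_pages <= batch_size:
--         return [(0, total_pages)]
--     n = (total_pages - batch_size + step - 1) // step
--     return [(i * step, min(i * step + batch_size, total_pages)) for i in range(n + 1)]
-- ===== Notes on version B (the rewrite author's own statement) =====
-- stated objective: simpler
-- what changed: Replaces the while-loop with its running end-check and break by a closed-form batch count n = ceil((total_pages-batch_size)/step) and a single comprehension over range(n+1), with the total_pages<=batch_size case handled directly.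
import Mathlib
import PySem

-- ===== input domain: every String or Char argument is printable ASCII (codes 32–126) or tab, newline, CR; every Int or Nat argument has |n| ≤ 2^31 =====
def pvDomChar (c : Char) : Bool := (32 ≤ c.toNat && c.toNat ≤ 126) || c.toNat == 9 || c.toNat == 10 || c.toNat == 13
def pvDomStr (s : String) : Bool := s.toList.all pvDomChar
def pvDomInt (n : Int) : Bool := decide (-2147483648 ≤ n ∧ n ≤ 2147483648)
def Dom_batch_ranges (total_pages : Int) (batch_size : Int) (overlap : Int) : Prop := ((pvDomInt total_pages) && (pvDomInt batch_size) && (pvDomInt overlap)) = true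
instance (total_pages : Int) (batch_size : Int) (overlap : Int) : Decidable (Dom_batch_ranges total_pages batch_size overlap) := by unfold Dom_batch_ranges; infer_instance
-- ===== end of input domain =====

-- B replaces A's while-loop (running end-check with break) by a closed-form batch count
-- and a single comprehension over range(n+1); objective: simpler decomposition, same cost.

-- ===== PORT A =====
-- the while-loop of A, step for step (dite guard = the loop condition; proof arg only for termination)
def batchLoopA (total bs step : Int) (hstep : 0 < step) (start : Int) : List (Int × Int) :=
  if _h : start < total then
    if total ≤ min (start + bs) total then [(start, min (start + bs) total)]
    else (start, min (start + bs) total) :: batchLoopA total bs step hstep (start + step)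
  else []
termination_by (total - start).toNat
decreasing_by omega

def batch_ranges (total_pages : Int) (batch_size : Int) (overlap : Int) : List (Int × Int) :=
  if total_pages ≤ 0 then []
  else
    batchLoopA total_pages (max 1 batch_size)
      (max 1 batch_size - max 0 (min overlap (max 1 batch_size - 1))) (by omega) 0

-- ===== PORT B =====
def batch_ranges_alt (total_pages : Int) (batch_size : Int) (overlap : Int) : List (Int × Int) :=
  if total_pages ≤ 0 then []
  else
    let bs := max 1 batch_size
    let ov := max 0 (min overlap (bs - 1))
    let step := bs - ov
    if total_pages ≤ bs then [(0, total_pages)]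
    else
      let n := PySem.Int.floordiv (total_pages - bs + step - 1) step
      (PySem.List.pyRange 0 (n + 1) 1).map
        (fun i => (i * step, min (i * step + bs) total_pages))

-- ===== PRECONDITION & SPEC =====
def Spec_batch_ranges (total_pages : Int) (batch_size : Int) (overlap : Int) (out : List (Int × Int)) : Prop := out = batch_ranges_alt total_pages batch_size overlap
instance (total_pages : Int) (batch_size : Int) (overlap : Int) (out : List (Int × Int)) : Decidable (Spec_batch_ranges total_pages batch_size overlap out) := by unfold Spec_batch_ranges; infer_instance

-- ===== CLAIM (what is proved, stated in full; the proofs are below) =====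
def Claim_equal_batch_ranges : Prop := ∀ (total_pages : Int) (batch_size : Int) (overlap : Int), Dom_batch_ranges total_pages batch_size overlap → Spec_batch_ranges total_pages batch_size overlap (batch_ranges total_pages batch_size overlap)

-- ===== LEMMAS AND PROOFS =====

-- The loop started at i*step produces exactly the batches i, i+1, …, n,
-- where n is characterised by (n-1)*step < total - bs ≤ n*step.
lemma loopA_eq_map (total bs step : Int) (hstep : 0 < step) (hsb : step ≤ bs) (n : Int)
    (hn1 : total - bs ≤ n * step) (hn2 : (n - 1) * step < total - bs) :
    ∀ (i : Int), 0 ≤ i → i ≤ n →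
      batchLoopA total bs step hstep (i * step)
        = (PySem.List.pyRange i (n + 1) 1).map
            (fun j => (j * step, min (j * step + bs) total)) := by
  intro i hi0 hin
  induction hm : (n - i).toNat generalizing i with
  | zero =>
    have hie : i = n := by omega
    subst hie
    have hlt : i * step < total := by
      have h1 : (i - 1) * step = i * step - step := by ring
      omega
    have hend : total ≤ min (i * step + bs) total := by omega
    rw [batchLoopA, dif_pos hlt, if_pos hend,
        PySem.List.pyRange_one_cons (by omega),
        PySem.List.pyRange_one_eq_nil (by omega)]
    simp
  | succ m ih =>
    have hilt : i < n := by omega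
    have histep : i * step ≤ (n - 1) * step := by
      apply mul_le_mul_of_nonneg_right (by omega) (by omega)
    have hlt : i * step < total := by omega
    have hnoend : ¬ total ≤ min (i * step + bs) total := by omega
    have hstep' : i * step + step = (i + 1) * step := by ring
    rw [batchLoopA, dif_pos hlt, if_neg hnoend,
        PySem.List.pyRange_one_cons (show i < n + 1 by omega), List.map_cons,
        hstep', ih (i + 1) (by omega) (by omega) (by omega)]

-- ===== VERDICT (by name: the statement is the Claim_ definition above) =====
theorem batch_ranges_spec : Claim_equal_batch_ranges := by
  intro total bs ov _
  unfold Spec_batch_ranges batch_ranges batch_ranges_alt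
  by_cases h0 : total ≤ 0
  · simp [h0]
  · simp only [if_neg h0]
    set B := max 1 bs with hB
    set V := max 0 (min ov (B - 1)) with hV
    set S := B - V with hS
    have hSpos : 0 < S := by omega
    have hSB : S ≤ B := by omega
    by_cases hsmall : total ≤ B
    · rw [batchLoopA, dif_pos (by omega), if_pos (by omega)]
      rw [if_pos hsmall]
      have : min (0 + B) total = total := by omega
      rw [this]
    · rw [if_neg hsmall]
      set n := PySem.Int.floordiv (total - B + S - 1) S with hn
      have hchar := (PySem.Int.floordiv_eq_iff_of_pos hSpos
          (a := total - B + S - 1) (q := n)).mp rfl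
      have hexp1 : (n + 1) * S = n * S + S := by ring
      have hexp2 : (n - 1) * S = n * S - S := by ring
      have hn1 : total - B ≤ n * S := by omega
      have hn2 : (n - 1) * S < total - B := by omega
      have hnpos : 0 ≤ n := by
        by_contra hneg
        have : n * S ≤ 0 := mul_nonpos_of_nonpos_of_nonneg (by omega) (by omega)
        omega
      have := loopA_eq_map total B S hSpos hSB n hn1 hn2 0 le_rfl hnpos
      rw [zero_mul] at this
      exact this
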